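-- pv_equiv track=rewrite | github.com/Ilovehiking9/SpiderSolitaire | test.py | groupNumbers
-- ===== SOURCE A (Python) =====
-- def groupNumbers(inputList, rangeLimit = 5):
--     outputList = []
--     currentGroup = [inputList[0]]
--
--     for i in range(1, len(inputList)):
--         if abs(inputList[i] - currentGroup[-1]) <= rangeLimit:
--             currentGroup.append(inputList[i])
--         else:
--             outputList.append(currentGroup)
--             currentGroup = [inputList[i]]
--
--     outputList.append(currentGroup)  # Add the last group
--     return outputList
-- ===== SOURCE B (Python) =====
-- def groupNumbers(inputList, rangeLimit = 5):
--     # Different decomposition: first find the cut positions (adjacent pairs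
--     # further apart than rangeLimit), then carve the list into slices.
--     if not inputList:
--         return []
--     cuts = [i for i in range(1, len(inputList))
--             if abs(inputList[i] - inputList[i-1]) > rangeLimit]
--     bounds = [0] + cuts + [len(inputList)]
--     return [inputList[a:b] for a, b in zip(bounds, bounds[1:])]
-- ===== Notes on version B (the rewrite author's own statement) =====
-- stated objective: alternative
-- what changed: B first computes the list of cut positions (adjacent pairs further apart than rangeLimit) with one comprehension over index pairs and then carves the input into slices between consecutive boundaries, instead of A's single loop that accumulates a currentGroup and flushes it into an output list.
import Mathlib
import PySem

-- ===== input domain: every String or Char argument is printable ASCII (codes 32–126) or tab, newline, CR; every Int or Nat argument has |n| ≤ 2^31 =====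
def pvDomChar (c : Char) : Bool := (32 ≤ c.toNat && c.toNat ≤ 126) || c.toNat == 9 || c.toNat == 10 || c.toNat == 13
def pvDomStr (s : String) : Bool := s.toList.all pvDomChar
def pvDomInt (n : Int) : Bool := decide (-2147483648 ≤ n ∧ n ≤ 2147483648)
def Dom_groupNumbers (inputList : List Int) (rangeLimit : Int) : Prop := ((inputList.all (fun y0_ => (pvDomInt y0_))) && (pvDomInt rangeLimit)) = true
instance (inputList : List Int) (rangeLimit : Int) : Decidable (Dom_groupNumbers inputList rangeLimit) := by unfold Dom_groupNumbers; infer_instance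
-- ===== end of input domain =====

-- B finds the cut positions first and then carves the list into slices (alternative decomposition, same cost);
-- A raises IndexError on the empty list (excluded by Pre_), where B returns [].

-- ===== PORT A =====
-- loop body of A's for-loop (helper; v is inputList[i])
def pvStepA (r : Int) (st : List (List Int) × List Int) (v : Int) : List (List Int) × List Int :=
  if |v - PySem.List.pyGetD st.2 (-1) 0| ≤ r then (st.1, st.2 ++ [v]) else (st.1 ++ [st.2], [v])

def groupNumbers (inputList : List Int) (rangeLimit : Int) : List (List Int) :=
  match inputList with
  | [] => []   -- Python: inputList[0] raises IndexError here; excluded by Pre_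
  | x :: _ =>
    let st := (PySem.List.pyRange 1 (inputList.length : Int) 1).foldl
      (fun st i => pvStepA rangeLimit st (PySem.List.pyGetD inputList i 0)) ([], [x])
    st.1 ++ [st.2]

-- ===== PORT B =====
def groupNumbers_alt (inputList : List Int) (rangeLimit : Int) : List (List Int) :=
  if inputList = [] then []
  else
    let cuts := (PySem.List.pyRange 1 (inputList.length : Int) 1).filter
      (fun i => rangeLimit < |PySem.List.pyGetD inputList i 0 - PySem.List.pyGetD inputList (i - 1) 0|)
    let bounds := 0 :: (cuts ++ [(inputList.length : Int)])
    (bounds.zip bounds.tail).map (fun ab => PySem.List.slice inputList (some ab.1) (some ab.2))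

-- ===== PRECONDITION & SPEC =====
-- Pre_ excludes exactly the empty list, on which Python A raises IndexError (inputList[0]).
def Pre_groupNumbers (inputList : List Int) (rangeLimit : Int) : Prop := inputList ≠ []
instance (inputList : List Int) (rangeLimit : Int) : Decidable (Pre_groupNumbers inputList rangeLimit) := by unfold Pre_groupNumbers; infer_instance
def pvWitness_groupNumbers : List Int × Int := ([1, 3, 10, 12, 30], 5)

def Spec_groupNumbers (inputList : List Int) (rangeLimit : Int) (out : List (List Int)) : Prop := out = groupNumbers_alt inputList rangeLimit
instance (inputList : List Int) (rangeLimit : Int) (out : List (List Int)) : Decidable (Spec_groupNumbers inputList rangeLimit out) := by unfold Spec_groupNumbers; infer_instance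

-- ===== CLAIM (what is proved, stated in full; the proofs are below) =====
def Claim_equal_groupNumbers : Prop := ∀ (inputList : List Int) (rangeLimit : Int), Dom_groupNumbers inputList rangeLimit → Pre_groupNumbers inputList rangeLimit → Spec_groupNumbers inputList rangeLimit (groupNumbers inputList rangeLimit)

-- ===== LEMMAS AND PROOFS =====

-- reference grouping: pvChunks r x xs = the groups of (x :: xs)
def pvChunks (r : Int) (x : Int) : List Int → List (List Int)
  | [] => [[x]]
  | y :: t =>
    if |y - x| ≤ r then
      match pvChunks r y t with
      | [] => [[x]]
      | g :: gs => (x :: g) :: gs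
    else [x] :: pvChunks r y t

theorem pvChunks_shape (r x : Int) (t : List Int) :
    ∃ g gs, pvChunks r x t = (x :: g) :: gs := by
  cases t with
  | nil => exact ⟨[], [], rfl⟩
  | cons y t =>
    obtain ⟨g, gs, hg⟩ := pvChunks_shape r y t
    by_cases h : |y - x| ≤ r
    · exact ⟨y :: g, gs, by simp [pvChunks, h, hg]⟩
    · exact ⟨[], pvChunks r y t, by simp [pvChunks, h]⟩

-- ---- A-side: the accumulator loop computes pvChunks ----

-- glue grp gs: replace the head element of the first group by grp
def pvGlue (grp : List Int) : List (List Int) → List (List Int)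
  | [] => [grp]
  | g :: gs => (grp ++ g.tail) :: gs

theorem pvFoldA (r : Int) (t : List Int) :
    ∀ (out : List (List Int)) (grp : List Int) (x : Int), grp ≠ [] → grp.getLast? = some x →
      (let st := t.foldl (pvStepA r) (out, grp); st.1 ++ [st.2])
        = out ++ pvGlue grp (pvChunks r x t) := by
  induction t with
  | nil => intro out grp x hne hlast; simp [pvChunks, pvGlue]
  | cons v t ih =>
    intro out grp x hne hlast
    have hget : PySem.List.pyGetD grp (-1) 0 = x := by
      rw [PySem.List.pyGetD_neg_one grp 0 hne, List.getLast_eq_iff_getLast?_eq_some hne]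
      exact hlast
    by_cases h : |v - x| ≤ r
    · have hstep : pvStepA r (out, grp) v = (out, grp ++ [v]) := by
        simp [pvStepA, hget, h]
      have ih' := ih out (grp ++ [v]) v (by simp) (by simp)
      simp only [List.foldl_cons, hstep, ih']
      obtain ⟨g, gs, hg⟩ := pvChunks_shape r v t
      simp [pvChunks, h, hg, pvGlue]
    · have hstep : pvStepA r (out, grp) v = (out ++ [grp], [v]) := by
        simp [pvStepA, hget, h]
      have ih' := ih (out ++ [grp]) [v] v (by simp) (by simp)
      simp only [List.foldl_cons, hstep, ih']
      obtain ⟨g, gs, hg⟩ := pvChunks_shape r v t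
      simp [pvChunks, h, hg, pvGlue]

theorem pvA_eq_chunks (r x : Int) (t : List Int) :
    groupNumbers (x :: t) r = pvChunks r x t := by
  unfold groupNumbers
  simp only []
  rw [PySem.List.foldl_pyRange_pyGetD' (x :: t) 0 (pvStepA r) (([], [x])) (by norm_num)]
  simp only [Int.toNat_one, List.drop_one, List.tail_cons]
  have := pvFoldA r t [] [x] x (by simp) (by simp)
  simp only at this
  rw [this]
  obtain ⟨g, gs, hg⟩ := pvChunks_shape r x t
  simp [hg, pvGlue]

-- ---- B-side: cut positions + slices compute pvChunks ----

-- the cut positions, as Nat offsets: k means a cut between positions k and k+1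
def pvNatCuts (r : Int) (l : List Int) : List Nat :=
  (List.range (l.length - 1)).filter (fun k => decide (r < |l.getD (k+1) 0 - l.getD k 0|))

-- the groups carved out of l by a Nat boundary list
def pvSliceGroups (l : List Int) (bs : List Nat) : List (List Int) :=
  (bs.zip bs.tail).map (fun ab => (l.drop ab.1).take (ab.2 - ab.1))

theorem pvSliceGroups_cons (l : List Int) (a b : Nat) (bs : List Nat) :
    pvSliceGroups l (a :: b :: bs) = ((l.drop a).take (b - a)) :: pvSliceGroups l (b :: bs) := rfl

theorem pvSliceGroups_shift (x : Int) (l : List Int) (bs : List Nat) :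
    pvSliceGroups (x :: l) (bs.map (· + 1)) = pvSliceGroups l bs := by
  unfold pvSliceGroups
  rw [← List.map_tail, List.zip_map, List.map_map]
  apply List.map_congr_left
  intro ab _
  simp [Prod.map, Nat.add_sub_add_right]

theorem pvNatCuts_cons (r x y : Int) (t : List Int) :
    pvNatCuts r (x :: y :: t)
      = (if r < |y - x| then [0] else []) ++ (pvNatCuts r (y :: t)).map (· + 1) := by
  unfold pvNatCuts
  simp only [List.length_cons, Nat.add_sub_cancel, List.range_succ_eq_map,
    List.filter_cons, List.getD_cons_succ, List.getD_cons_zero, List.filter_map]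
  by_cases h : r < |y - x|
  · simp [h, Function.comp_def]
    exact List.map_congr_left (fun a _ => rfl)
  · simp [h, Function.comp_def]
    exact List.map_congr_left (fun a _ => rfl)

theorem pvSliceGroups_cast (l : List Int) (bs : List Nat) :
    ((bs.map (fun n : Nat => (n : Int))).zip ((bs.map (fun n : Nat => (n : Int))).tail)).map
      (fun ab => PySem.List.slice l (some ab.1) (some ab.2)) = pvSliceGroups l bs := by
  unfold pvSliceGroups
  rw [← List.map_tail, List.zip_map, List.map_map]
  apply List.map_congr_left
  intro ab _
  simp [Prod.map, PySem.List.slice_natCast]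

theorem pvBalt_eq_sliceGroups (l : List Int) (r : Int) (h : l ≠ []) :
    groupNumbers_alt l r
      = pvSliceGroups l (0 :: ((pvNatCuts r l).map (· + 1) ++ [l.length])) := by
  unfold groupNumbers_alt
  rw [if_neg h]
  have htoNat : ((l.length : Int) - 1).toNat = l.length - 1 := by omega
  have hcuts : (PySem.List.pyRange 1 (l.length : Int) 1).filter
      (fun i => decide (r < |PySem.List.pyGetD l i 0 - PySem.List.pyGetD l (i - 1) 0|))
      = ((pvNatCuts r l).map (· + 1)).map (fun n : Nat => (n : Int)) := by
    rw [PySem.List.pyRange_one, htoNat, List.filter_map]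
    unfold pvNatCuts
    have hpred : ∀ k : Nat,
        ((fun i => decide (r < |PySem.List.pyGetD l i 0 - PySem.List.pyGetD l (i - 1) 0|)) ∘
          (fun k : Nat => (1 : Int) + (k : Int))) k
        = decide (r < |l.getD (k+1) 0 - l.getD k 0|) := by
      intro k
      have e1 : (1 : Int) + (k : Int) = ((k + 1 : Nat) : Int) := by push_cast; ring
      simp only [Function.comp_apply, e1]
      rw [show ((k + 1 : Nat) : Int) - 1 = ((k : Nat) : Int) by push_cast; ring]
      rw [PySem.List.pyGetD_natCast, PySem.List.pyGetD_natCast]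
    rw [List.filter_congr (fun k _ => hpred k), List.map_map]
    apply List.map_congr_left
    intro k _
    simp [Function.comp]
    ring
  simp only [hcuts]
  have hb : (0 : Int) :: (((pvNatCuts r l).map (· + 1)).map (fun n : Nat => (n : Int)) ++ [(l.length : Int)])
      = (0 :: ((pvNatCuts r l).map (· + 1) ++ [l.length])).map (fun n : Nat => (n : Int)) := by
    simp
  rw [hb, pvSliceGroups_cast]

theorem pvSliceGroups_eq_chunks (r : Int) (t : List Int) :
    ∀ x, pvSliceGroups (x :: t) (0 :: ((pvNatCuts r (x :: t)).map (· + 1) ++ [(x :: t).length]))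
      = pvChunks r x t := by
  induction t with
  | nil =>
    intro x
    simp [pvSliceGroups, pvNatCuts, pvChunks]
  | cons y t ih =>
    intro x
    rw [pvNatCuts_cons]
    by_cases h : r < |y - x|
    · have hb : ((if r < |y - x| then [0] else []) ++ (pvNatCuts r (y :: t)).map (· + 1)).map (· + 1)
          ++ [(x :: y :: t).length]
          = (0 :: ((pvNatCuts r (y :: t)).map (· + 1) ++ [(y :: t).length])).map (· + 1) := by
        simp [h]
      rw [hb]
      have h0 : (0 :: ((pvNatCuts r (y :: t)).map (· + 1) ++ [(y :: t).length])).map (· + 1)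
          = 1 :: ((pvNatCuts r (y :: t)).map (· + 1) ++ [(y :: t).length]).map (· + 1) := by simp
      rw [h0, pvSliceGroups_cons, ← h0, pvSliceGroups_shift, ih y]
      have hr : ¬ |y - x| ≤ r := not_le.mpr h
      simp [pvChunks, hr]
    · have hb : ((if r < |y - x| then [0] else []) ++ (pvNatCuts r (y :: t)).map (· + 1)).map (· + 1)
          ++ [(x :: y :: t).length]
          = ((pvNatCuts r (y :: t)).map (· + 1) ++ [(y :: t).length]).map (· + 1) := by
        simp [h]
      rw [hb]
      obtain ⟨c, cs, hT⟩ : ∃ c cs, (pvNatCuts r (y :: t)).map (· + 1) ++ [(y :: t).length] = c :: cs := by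
        cases hC : (pvNatCuts r (y :: t)).map (· + 1) with
        | nil => exact ⟨_, _, rfl⟩
        | cons a l => exact ⟨_, _, rfl⟩
      rw [hT]
      have ih' := ih y
      rw [hT, pvSliceGroups_cons] at ih'
      obtain ⟨g, gs, hg⟩ := pvChunks_shape r y t
      rw [hg] at ih'
      have h1 : (y :: t).take c = y :: g := by
        have := congrArg (fun l => l.headD []) ih'
        simpa using this
      have h2 : pvSliceGroups (y :: t) (c :: cs) = gs := by
        have := congrArg List.tail ih'
        simpa using this
      have hmapc : (c :: cs).map (· + 1) = (c+1) :: cs.map (· + 1) := by simp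
      rw [hmapc, pvSliceGroups_cons, ← hmapc, pvSliceGroups_shift, h2]
      have hr : |y - x| ≤ r := not_lt.mp h
      simp [pvChunks, hr, hg, List.take_succ_cons, h1]

-- ===== VERDICT (by name: the statement is the Claim_ definition above) =====
theorem groupNumbers_spec : Claim_equal_groupNumbers := by
  intro inputList rangeLimit _ hpre
  unfold Spec_groupNumbers
  cases inputList with
  | nil => exact absurd rfl hpre
  | cons x t =>
    rw [pvA_eq_chunks, pvBalt_eq_sliceGroups _ _ (by simp), pvSliceGroups_eq_chunks]
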